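-- pv_equiv track=rewrite | github.com/HugoFara/pylinkage | src/pylinkage/assur/signature.py | isomer_to_canonical
-- ===== SOURCE A (Python) =====
-- def isomer_to_canonical(signature: str) -> str:
--     """Convert an isomer signature to canonical form.
--
--     Maps extended T/_ notation to standard R/P notation by treating
--     T and _ as parts of a single prismatic joint.
--
--     Args:
--         signature: Isomer signature (e.g., "RT_R", "T_R_T").
--
--     Returns:
--         Canonical signature (e.g., "RPR", "PPR").
--
--     Example:
--         >>> isomer_to_canonical("RT_R")
--         'RPR'
--         >>> isomer_to_canonical("T_R_T")
--         'PRP'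
--         >>> isomer_to_canonical("RRR")
--         'RRR'
--     """
--     # Remove guides and convert sliders to P
--     normalized = signature.upper()
--
--     # Count joint types (each T_ or _T pair = one P)
--     result: list[str] = []
--     i = 0
--     while i < len(normalized):
--         char = normalized[i]
--         if char == "R":
--             result.append("R")
--             i += 1
--         elif char == "T":
--             result.append("P")
--             # Skip following guide if present
--             if i + 1 < len(normalized) and normalized[i + 1] == "_":
--                 i += 2
--             else:
--                 i += 1
--         elif char == "_":
--             # Guide without preceding slider - skip if followed by T
--             if i + 1 < len(normalized) and normalized[i + 1] == "T":
--                 result.append("P")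
--                 i += 2
--             else:
--                 i += 1
--         elif char == "P":
--             result.append("P")
--             i += 1
--         elif char == " ":
--             i += 1  # Skip spaces
--         else:
--             i += 1  # Skip unknown
--
--     return "".join(result)
-- ===== SOURCE B (Python) =====
-- _CANON = {'R': 'R', 'T': 'P', 'P': 'P'}
--
--
-- def isomer_to_canonical(signature: str) -> str:
--     return ''.join(_CANON.get(c, '') for c in signature.upper())
-- ===== Notes on version B (the rewrite author's own statement) =====
-- stated objective: simpler
-- what changed: Replaced A's index-based while loop with one-character lookahead by a single per-character table map (R->R, T->P, P->P, everything else dropped), exploiting that every T contributes exactly one P so the guide lookahead is redundant.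
import Mathlib
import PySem

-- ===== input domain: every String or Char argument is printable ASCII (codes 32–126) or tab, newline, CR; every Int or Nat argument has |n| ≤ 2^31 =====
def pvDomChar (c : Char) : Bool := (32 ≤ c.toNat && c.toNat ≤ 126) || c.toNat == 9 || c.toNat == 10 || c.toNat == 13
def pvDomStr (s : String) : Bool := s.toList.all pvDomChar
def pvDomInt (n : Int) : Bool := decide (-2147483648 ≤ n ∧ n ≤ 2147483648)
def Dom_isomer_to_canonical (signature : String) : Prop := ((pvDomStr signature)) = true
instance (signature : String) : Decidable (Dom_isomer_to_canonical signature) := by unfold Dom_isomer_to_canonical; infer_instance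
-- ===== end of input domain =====

-- B replaces A's index/lookahead state machine by a per-character table map (objective: simpler; A's lookahead is provably redundant — every T yields exactly one P).

-- ===== PORT A =====
-- A's while-loop over indices with one-character lookahead, transcribed as
-- recursion over the character list (the lookahead 'normalized[i+1]' is the
-- head of the rest, 'i += 2' drops it as well).
def pvLoopA : List Char → List Char
  | [] => []
  | c :: rest =>
    if c = 'R' then 'R' :: pvLoopA rest
    else if c = 'T' then
      -- append "P"; skip following guide if present (i += 2 = drop the lookahead too)
      'P' :: (if rest.head? = some '_' then pvLoopA rest.tail else pvLoopA rest)
    else if c = '_' then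
      -- guide without preceding slider - skip if followed by T
      (if rest.head? = some 'T' then 'P' :: pvLoopA rest.tail else pvLoopA rest)
    else if c = 'P' then 'P' :: pvLoopA rest
    else pvLoopA rest  -- spaces and unknown: skip
termination_by l => l.length
decreasing_by all_goals (simp [List.length_tail]; try omega)

def isomer_to_canonical (signature : String) : String :=
  String.ofList (pvLoopA (PySem.Str.upper signature).toList)

-- ===== PORT B =====
-- _CANON = {'R': 'R', 'T': 'P', 'P': 'P'}
def pvCanon : PySem.Dict Char String :=
  (((PySem.Dict.empty.insert 'R' "R").insert 'T' "P").insert 'P' "P")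

-- ''.join(_CANON.get(c, '') for c in signature.upper())
def isomer_to_canonical_alt (signature : String) : String :=
  String.ofList ((PySem.Str.upper signature).toList.flatMap
    (fun c => (pvCanon.getD c "").toList))

-- ===== PRECONDITION & SPEC =====
def Spec_isomer_to_canonical (signature : String) (out : String) : Prop := out = isomer_to_canonical_alt signature
instance (signature : String) (out : String) : Decidable (Spec_isomer_to_canonical signature out) := by unfold Spec_isomer_to_canonical; infer_instance

-- ===== CLAIM (what is proved, stated in full; the proofs are below) =====
def Claim_equal_isomer_to_canonical : Prop := ∀ (signature : String), Dom_isomer_to_canonical signature → Spec_isomer_to_canonical signature (isomer_to_canonical signature)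

-- ===== LEMMAS AND PROOFS =====
theorem pvCanon_getD (c : Char) :
    pvCanon.getD c "" =
      if c = 'R' then "R" else if c = 'T' then "P" else if c = 'P' then "P" else "" := by
  have h : pvCanon = PySem.Dict.mk [('R', "R"), ('T', "P"), ('P', "P")] := by decide
  rw [h]
  simp only [PySem.Dict.getD, PySem.Dict.get?_mk_cons]
  by_cases h1 : c = 'R' <;> by_cases h2 : c = 'T' <;> by_cases h3 : c = 'P' <;>
    (split_ifs <;> simp_all [PySem.Dict.get?, @eq_comm Char])

theorem pvLoopA_eq_flatMap (l : List Char) :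
    pvLoopA l = l.flatMap (fun c => (pvCanon.getD c "").toList) := by
  induction l using pvLoopA.induct <;>
    simp_all [pvLoopA, pvCanon_getD]
  case case3 rest ih2 ih1 => intro h; cases rest <;> simp_all
  case case4 rest h ih1 => cases rest <;> simp_all

-- ===== VERDICT (by name: the statement is the Claim_ definition above) =====
theorem isomer_to_canonical_spec : Claim_equal_isomer_to_canonical := by
  intro signature _
  unfold Spec_isomer_to_canonical isomer_to_canonical isomer_to_canonical_alt
  rw [pvLoopA_eq_flatMap]
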